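-- pv_equiv track=rewrite | github.com/Mmaarten23/aoc | 2022/day18.py | is_next_to_air
-- ===== SOURCE A (Python) =====
-- def is_next_to_air(x: int, y: int, z: int, air: list[tuple[int, int, int]]) -> bool:
--     for dx in range(-1, 2):
--         if air.__contains__((x + dx, y, z)):
--             return True
--     for dy in range(-1, 2):
--         if air.__contains__((x, y + dy, z)):
--             return True
--     for dz in range(-1, 2):
--         if air.__contains__((x, y, z + dz)):
--             return True
--     return False
-- ===== SOURCE B (Python) =====
-- def is_next_to_air(x: int, y: int, z: int, air: list[tuple[int, int, int]]) -> bool: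
--     for (a, b, c) in air:
--         if abs(a - x) + abs(b - y) + abs(c - z) <= 1:
--             return True
--     return False
-- ===== Notes on version B (the rewrite author's own statement) =====
-- stated objective: alternative
-- what changed: B makes one pass over the air list testing Manhattan distance <= 1 per cell, instead of generating 9 candidate coordinates and membership-scanning air for each.
import Mathlib
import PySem

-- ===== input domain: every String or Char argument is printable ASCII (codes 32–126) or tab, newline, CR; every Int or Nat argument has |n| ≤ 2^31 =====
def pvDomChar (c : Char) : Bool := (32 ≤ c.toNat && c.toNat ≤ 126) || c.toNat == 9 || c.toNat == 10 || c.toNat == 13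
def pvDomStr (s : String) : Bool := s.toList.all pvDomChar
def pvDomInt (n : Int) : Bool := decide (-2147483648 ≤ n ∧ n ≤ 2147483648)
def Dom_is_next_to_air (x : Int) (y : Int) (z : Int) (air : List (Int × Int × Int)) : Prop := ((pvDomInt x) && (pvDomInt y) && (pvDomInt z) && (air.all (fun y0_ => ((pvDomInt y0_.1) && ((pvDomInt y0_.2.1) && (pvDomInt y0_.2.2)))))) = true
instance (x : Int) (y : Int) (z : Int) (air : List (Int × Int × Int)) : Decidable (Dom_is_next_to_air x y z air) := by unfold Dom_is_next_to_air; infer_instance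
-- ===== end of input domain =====

-- B replaces A's generate-9-candidates-and-membership-test strategy by a single pass over
-- the air list with a Manhattan-distance-≤-1 predicate (objective: alternative, same cost).

-- ===== PORT A =====
-- A: three for-loops over range(-1,2), each early-returning when the candidate cell is in air
def is_next_to_air (x : Int) (y : Int) (z : Int) (air : List (Int × Int × Int)) : Bool :=
  if (PySem.List.pyRange (-1) 2 1).any (fun dx => air.contains (x + dx, y, z)) then true
  else if (PySem.List.pyRange (-1) 2 1).any (fun dy => air.contains (x, y + dy, z)) then true
  else if (PySem.List.pyRange (-1) 2 1).any (fun dz => air.contains (x, y, z + dz)) then true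
  else false

-- ===== PORT B =====
-- B: single pass over air, early-returning when a cell has Manhattan distance ≤ 1
def is_next_to_air_alt (x : Int) (y : Int) (z : Int) (air : List (Int × Int × Int)) : Bool :=
  air.any (fun p => decide ((p.1 - x).natAbs + (p.2.1 - y).natAbs + (p.2.2 - z).natAbs ≤ 1))

-- ===== PRECONDITION & SPEC =====
def Spec_is_next_to_air (x : Int) (y : Int) (z : Int) (air : List (Int × Int × Int)) (out : Bool) : Prop := out = is_next_to_air_alt x y z air
instance (x : Int) (y : Int) (z : Int) (air : List (Int × Int × Int)) (out : Bool) : Decidable (Spec_is_next_to_air x y z air out) := by unfold Spec_is_next_to_air; infer_instance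

-- ===== CLAIM (what is proved, stated in full; the proofs are below) =====
def Claim_equal_is_next_to_air : Prop := ∀ (x : Int) (y : Int) (z : Int) (air : List (Int × Int × Int)), Dom_is_next_to_air x y z air → Spec_is_next_to_air x y z air (is_next_to_air x y z air)

-- ===== LEMMAS AND PROOFS =====

-- distance ≤ 1 holds exactly at the 7 candidate cells A tests (the 2 duplicates collapse)
theorem dist_char (x y z a b c : Int) :
    ((a - x).natAbs + (b - y).natAbs + (c - z).natAbs ≤ 1) ↔
    ((a, b, c) = (x - 1, y, z) ∨ (a, b, c) = (x, y, z) ∨ (a, b, c) = (x + 1, y, z) ∨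
     (a, b, c) = (x, y - 1, z) ∨ (a, b, c) = (x, y + 1, z) ∨
     (a, b, c) = (x, y, z - 1) ∨ (a, b, c) = (x, y, z + 1)) := by
  simp only [Prod.mk.injEq]
  omega

-- ===== VERDICT (by name: the statement is the Claim_ definition above) =====
theorem is_next_to_air_spec : Claim_equal_is_next_to_air := by
  intro x y z air _
  unfold Spec_is_next_to_air is_next_to_air is_next_to_air_alt
  have h : PySem.List.pyRange (-1) 2 1 = [-1, 0, 1] := by decide
  rw [h]
  simp only [List.any_cons, List.any_nil, List.contains_eq_mem, Bool.or_false,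
    Bool.or_eq_true, decide_eq_true_eq]
  split_ifs with h1 h2 h3
  all_goals symm
  · rw [List.any_eq_true]
    rcases h1 with hm | hm | hm
    · exact ⟨_, hm, by simp only [decide_eq_true_eq, dist_char]; simp <;> ring⟩
    · exact ⟨_, hm, by simp only [decide_eq_true_eq, dist_char]; simp <;> ring⟩
    · exact ⟨_, hm, by simp only [decide_eq_true_eq, dist_char]; simp <;> ring⟩
  · rw [List.any_eq_true]
    rcases h2 with hm | hm | hm
    · exact ⟨_, hm, by simp only [decide_eq_true_eq, dist_char]; simp <;> ring⟩
    · exact ⟨_, hm, by simp only [decide_eq_true_eq, dist_char]; simp <;> ring⟩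
    · exact ⟨_, hm, by simp only [decide_eq_true_eq, dist_char]; simp <;> ring⟩
  · rw [List.any_eq_true]
    rcases h3 with hm | hm | hm
    · exact ⟨_, hm, by simp only [decide_eq_true_eq, dist_char]; simp <;> ring⟩
    · exact ⟨_, hm, by simp only [decide_eq_true_eq, dist_char]; simp <;> ring⟩
    · exact ⟨_, hm, by simp only [decide_eq_true_eq, dist_char]; simp <;> ring⟩
  · rw [List.any_eq_false]
    have h1' : (x - 1, y, z) ∉ air ∧ (x, y, z) ∉ air ∧ (x + 1, y, z) ∉ air := by
      push_neg at h1
      simpa [show x + -1 = x - 1 by ring, show x + 0 = x by ring] using h1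
    have h2' : (x, y - 1, z) ∉ air ∧ (x, y + 1, z) ∉ air := by
      push_neg at h2
      simpa [show y + -1 = y - 1 by ring, show y + 0 = y by ring] using ⟨h2.1, h2.2.2⟩
    have h3' : (x, y, z - 1) ∉ air ∧ (x, y, z + 1) ∉ air := by
      push_neg at h3
      simpa [show z + -1 = z - 1 by ring, show z + 0 = z by ring] using ⟨h3.1, h3.2.2⟩
    rintro ⟨a, b, c⟩ hm
    simp only [decide_eq_true_eq, dist_char x y z a b c]
    rintro (he | he | he | he | he | he | he) <;> rw [he] at hm
    · exact h1'.1 hm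
    · exact h1'.2.1 hm
    · exact h1'.2.2 hm
    · exact h2'.1 hm
    · exact h2'.2 hm
    · exact h3'.1 hm
    · exact h3'.2 hm
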